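-- pv_equiv track=rewrite | github.com/milesjyoung/persona-bench-benchmark-inputs | memory_experiment/summarize_memory_run.py | cumulative_from_resets
-- ===== SOURCE A (Python) =====
-- def cumulative_from_resets(values: list[int | None]) -> int | None:
--     seen_any = False
--     cumulative = 0
--     previous = None
--     for value in values:
--         if value is None:
--             continue
--         seen_any = True
--         if previous is None:
--             cumulative += value
--         elif value >= previous:
--             cumulative += value - previous
--         else:
--             cumulative += value
--         previous = value
--     return cumulative if seen_any else None
-- ===== SOURCE B (Python) =====
-- def cumulative_from_resets(values: list[int | None]) -> int | None:
--     xs = [v for v in values if v is not None]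
--     if not xs:
--         return None
--     return sum(a for a, b in zip(xs, xs[1:]) if b < a) + xs[-1]
-- ===== Notes on version B (the rewrite author's own statement) =====
-- stated objective: idiomatic
-- what changed: B is stateless and staged: it filters out None, then sums the left element of every adjacent descending pair (each run's end) via zip plus the final element, instead of A's single stateful pass accumulating telescoped value-previous deltas.
import Mathlib
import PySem

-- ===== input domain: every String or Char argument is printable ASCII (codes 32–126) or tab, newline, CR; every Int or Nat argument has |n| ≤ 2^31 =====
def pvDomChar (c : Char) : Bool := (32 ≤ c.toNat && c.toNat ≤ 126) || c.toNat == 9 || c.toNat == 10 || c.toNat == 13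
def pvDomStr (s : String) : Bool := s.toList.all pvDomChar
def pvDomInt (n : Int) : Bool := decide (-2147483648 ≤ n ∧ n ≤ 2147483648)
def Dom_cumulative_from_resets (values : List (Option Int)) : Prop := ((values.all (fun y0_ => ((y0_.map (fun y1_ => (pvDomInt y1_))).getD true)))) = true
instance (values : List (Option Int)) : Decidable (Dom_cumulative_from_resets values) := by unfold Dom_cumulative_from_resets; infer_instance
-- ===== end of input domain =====

-- B is staged and stateless: filter out None, then sum each run's end as the left element of every adjacent descending pair plus the last element; objective: idiomatic.


-- ===== PORT A =====
-- state: (seen_any, cumulative, previous)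
def pvAStep (st : Bool × Int × Option Int) (value : Option Int) : Bool × Int × Option Int :=
  match value with
  | none => st
  | some v =>
    let cum :=
      match st.2.2 with
      | none => st.2.1 + v
      | some p => if v ≥ p then st.2.1 + (v - p) else st.2.1 + v
    (true, cum, some v)

def cumulative_from_resets (values : List (Option Int)) : Option Int :=
  let s := values.foldl pvAStep (false, 0, none)
  if s.1 then some s.2.1 else none

-- ===== PORT B =====
-- sum(a for a, b in zip(xs, xs[1:]) if b < a)
def pvDescSum (xs : List Int) : Int :=
  ((((xs.zip xs.tail).filter (fun p => p.2 < p.1)).map (fun p => p.1)).sum)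

def cumulative_from_resets_alt (values : List (Option Int)) : Option Int :=
  let xs := values.filterMap id
  if xs.isEmpty then none
  else some (pvDescSum xs + xs.getLastD 0)

-- ===== PRECONDITION & SPEC =====
def Spec_cumulative_from_resets (values : List (Option Int)) (out : Option Int) : Prop := out = cumulative_from_resets_alt values
instance (values : List (Option Int)) (out : Option Int) : Decidable (Spec_cumulative_from_resets values out) := by unfold Spec_cumulative_from_resets; infer_instance

-- ===== CLAIM (what is proved, stated in full; the proofs are below) =====
def Claim_equal_cumulative_from_resets : Prop := ∀ (values : List (Option Int)), Dom_cumulative_from_resets values → Spec_cumulative_from_resets values (cumulative_from_resets values)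

-- ===== LEMMAS AND PROOFS =====
-- A's loop ignores None, so it equals the same fold over the filtered Int list.
def pvStepI (st : Bool × Int × Option Int) (v : Int) : Bool × Int × Option Int := pvAStep st (some v)

theorem pv_fold_filter (values : List (Option Int)) (st : Bool × Int × Option Int) :
    values.foldl pvAStep st = (values.filterMap id).foldl pvStepI st := by
  induction values generalizing st with
  | nil => rfl
  | cons x xs ih =>
    cases x with
    | none => simpa [pvAStep] using ih st
    | some v => simpa [pvStepI] using ih (pvAStep st (some v))

theorem pv_descSum_cons (p v : Int) (vs : List Int) :
    pvDescSum (p :: v :: vs) = (if v < p then p else 0) + pvDescSum (v :: vs) := by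
  by_cases h : v < p <;> simp [pvDescSum, h]

-- Invariant: from state (true, cum, some p), A's fold over xs yields cumulative
-- cum + pvDescSum (p::xs) + last (p::xs) - p, with previous = last (p::xs).
theorem pv_fold_inv (xs : List Int) (cum p : Int) :
    xs.foldl pvStepI (true, cum, some p) =
      (true, cum + pvDescSum (p :: xs) + (p :: xs).getLastD 0 - p, some ((p :: xs).getLastD 0)) := by
  induction xs generalizing cum p with
  | nil => simp [pvDescSum]
  | cons v vs ih =>
    by_cases hv : v ≥ p
    · have h1 : ¬ v < p := by omega
      rw [List.foldl_cons,
        show pvStepI (true, cum, some p) v = (true, cum + (v - p), some v) from by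
          simp [pvStepI, pvAStep, hv],
        ih, pv_descSum_cons]
      simp only [if_neg h1, List.getLastD_cons, Prod.mk.injEq]
      exact ⟨trivial, by ring, trivial⟩
    · have h1 : v < p := by omega
      rw [List.foldl_cons,
        show pvStepI (true, cum, some p) v = (true, cum + v, some v) from by
          simp [pvStepI, pvAStep, hv],
        ih, pv_descSum_cons]
      simp only [if_pos h1, List.getLastD_cons, Prod.mk.injEq]
      exact ⟨trivial, by ring, trivial⟩

-- ===== VERDICT (by name: the statement is the Claim_ definition above) =====
theorem cumulative_from_resets_spec : Claim_equal_cumulative_from_resets := by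
  intro values _
  unfold Spec_cumulative_from_resets cumulative_from_resets cumulative_from_resets_alt
  rw [pv_fold_filter]
  rcases h : values.filterMap id with _ | ⟨x, rest⟩
  · simp
  · have hstep : pvStepI (false, 0, none) x = (true, 0 + x, some x) := by
      simp [pvStepI, pvAStep]
    rw [List.foldl_cons, hstep, pv_fold_inv]
    simp
    ring
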